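-- pv_equiv track=rewrite | github.com/Dogsweater/ThinkPython2 | p9/mycartalk.py | is_three_pairs
-- ===== SOURCE A (Python) =====
-- def is_three_pairs(word):
--     if len(word)<6:
--         return False
--     if word[0]==word[1]:
--         if word[2]==word[3]:
--             if word[4]==word[5]:
--                 return True
--     return is_three_pairs(word[1:])
-- ===== SOURCE B (Python) =====
-- def is_three_pairs(word):
--     pairs = [word[i] == word[i + 1] for i in range(len(word) - 1)]
--     return any(pairs[i] and pairs[i + 2] and pairs[i + 4]
--                for i in range(len(pairs) - 4))
-- ===== Notes on version B (the rewrite author's own statement) =====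
-- stated objective: idiomatic
-- what changed: Replaced the recursive offset-by-offset descent with a precomputed boolean table of adjacent-equal pair positions scanned once with a stride-2 any().
import Mathlib
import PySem

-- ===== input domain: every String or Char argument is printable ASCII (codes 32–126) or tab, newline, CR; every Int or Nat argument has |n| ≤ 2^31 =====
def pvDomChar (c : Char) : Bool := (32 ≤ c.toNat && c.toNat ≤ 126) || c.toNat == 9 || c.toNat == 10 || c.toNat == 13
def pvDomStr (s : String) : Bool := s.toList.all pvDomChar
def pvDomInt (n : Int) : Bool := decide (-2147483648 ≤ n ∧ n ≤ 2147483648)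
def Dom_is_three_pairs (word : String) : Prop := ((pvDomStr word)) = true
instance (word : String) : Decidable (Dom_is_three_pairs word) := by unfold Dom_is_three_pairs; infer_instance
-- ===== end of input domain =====

-- B replaces A's recursive offset-by-offset descent by a precomputed table of
-- adjacent-equal pair positions scanned once with a stride-2 any (idiomatic, same cost).

-- ===== PORT A =====
-- A recurses on word[1:]; if fewer than 6 chars it returns False, else it tests
-- word[0]==word[1], word[2]==word[3], word[4]==word[5] in nested ifs.
def is_three_pairs_go : List Char → Bool
  | c0 :: c1 :: c2 :: c3 :: c4 :: c5 :: rest =>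
      if c0 == c1 then
        if c2 == c3 then
          if c4 == c5 then true
          else is_three_pairs_go (c1 :: c2 :: c3 :: c4 :: c5 :: rest)
        else is_three_pairs_go (c1 :: c2 :: c3 :: c4 :: c5 :: rest)
      else is_three_pairs_go (c1 :: c2 :: c3 :: c4 :: c5 :: rest)
  | [] => false
  | [_] => false
  | [_, _] => false
  | [_, _, _] => false
  | [_, _, _, _] => false
  | [_, _, _, _, _] => false

def is_three_pairs (word : String) : Bool := is_three_pairs_go word.toList

-- ===== PORT B =====
-- pairs = [word[i]==word[i+1] for i in range(len(word)-1)]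
-- any(pairs[i] and pairs[i+2] and pairs[i+4] for i in range(len(pairs)-4))
def is_three_pairs_alt (word : String) : Bool :=
  let cs := word.toList
  let pairs := (List.range (cs.length - 1)).map
    (fun i => cs.getD i 'a' == cs.getD (i + 1) 'a')
  (List.range (pairs.length - 4)).any
    (fun i => pairs.getD i false && pairs.getD (i + 2) false && pairs.getD (i + 4) false)

-- ===== PRECONDITION & SPEC =====
def Spec_is_three_pairs (word : String) (out : Bool) : Prop := out = is_three_pairs_alt word
instance (word : String) (out : Bool) : Decidable (Spec_is_three_pairs word out) := by unfold Spec_is_three_pairs; infer_instance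

-- ===== CLAIM (what is proved, stated in full; the proofs are below) =====
def Claim_equal_is_three_pairs : Prop := ∀ (word : String), Dom_is_three_pairs word → Spec_is_three_pairs word (is_three_pairs word)

-- ===== LEMMAS AND PROOFS =====

-- common characterisation: a triple of adjacent equal pairs starting at offset i
def pvTriple (cs : List Char) (i : Nat) : Bool :=
  (cs.getD i 'a' == cs.getD (i + 1) 'a') &&
  (cs.getD (i + 2) 'a' == cs.getD (i + 3) 'a') &&
  (cs.getD (i + 4) 'a' == cs.getD (i + 5) 'a')

theorem pvTriple_cons (c : Char) (cs : List Char) (i : Nat) :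
    pvTriple (c :: cs) (i + 1) = pvTriple cs i := by
  simp [pvTriple]

theorem pvAny_range_succ (m : Nat) (f : Nat → Bool) :
    (List.range (m + 1)).any f = (f 0 || (List.range m).any (fun i => f (i + 1))) := by
  simp [List.range_succ_eq_map, Function.comp_def]

theorem pvGo_eq (cs : List Char) :
    is_three_pairs_go cs = (List.range (cs.length - 5)).any (pvTriple cs) := by
  fun_induction is_three_pairs_go cs with
  | case1 c0 c1 c2 c3 c4 c5 rest h01 h23 h45 =>
      have hlen : (c0 :: c1 :: c2 :: c3 :: c4 :: c5 :: rest).length - 5 = rest.length + 1 := by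
        simp
      rw [hlen, pvAny_range_succ]
      have h0 : pvTriple (c0 :: c1 :: c2 :: c3 :: c4 :: c5 :: rest) 0 = true := by
        simp [pvTriple, h01, h23, h45]
      rw [h0]; simp
  | case2 c0 c1 c2 c3 c4 c5 rest h01 h23 h45 ih =>
      have hlen : (c0 :: c1 :: c2 :: c3 :: c4 :: c5 :: rest).length - 5
          = ((c1 :: c2 :: c3 :: c4 :: c5 :: rest).length - 5) + 1 := by simp
      rw [ih, hlen, pvAny_range_succ]
      simp only [pvTriple_cons]
      have h0 : pvTriple (c0 :: c1 :: c2 :: c3 :: c4 :: c5 :: rest) 0 = false := by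
        simp [pvTriple, h45]
      rw [h0]; simp
  | case3 c0 c1 c2 c3 c4 c5 rest h01 h23 ih =>
      have hlen : (c0 :: c1 :: c2 :: c3 :: c4 :: c5 :: rest).length - 5
          = ((c1 :: c2 :: c3 :: c4 :: c5 :: rest).length - 5) + 1 := by simp
      rw [ih, hlen, pvAny_range_succ]
      simp only [pvTriple_cons]
      have h0 : pvTriple (c0 :: c1 :: c2 :: c3 :: c4 :: c5 :: rest) 0 = false := by
        simp [pvTriple, h23]
      rw [h0]; simp
  | case4 c0 c1 c2 c3 c4 c5 rest h01 ih =>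
      have hlen : (c0 :: c1 :: c2 :: c3 :: c4 :: c5 :: rest).length - 5
          = ((c1 :: c2 :: c3 :: c4 :: c5 :: rest).length - 5) + 1 := by simp
      rw [ih, hlen, pvAny_range_succ]
      simp only [pvTriple_cons]
      have h0 : pvTriple (c0 :: c1 :: c2 :: c3 :: c4 :: c5 :: rest) 0 = false := by
        simp [pvTriple, h01]
      rw [h0]; simp
  | case5 => simp
  | case6 => simp
  | case7 => simp
  | case8 => simp
  | case9 => simp
  | case10 => simp

theorem pvAny_range_ext (m : Nat) (f g : Nat → Bool) (h : ∀ i, i < m → f i = g i) :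
    (List.range m).any f = (List.range m).any g := by
  induction m with
  | zero => simp
  | succ n ih =>
      rw [List.range_succ]
      simp only [List.any_append, List.any_cons, List.any_nil]
      rw [ih (fun i hi => h i (by omega)), h n (by omega)]

theorem pvGetD_map_range (m j : Nat) (f : Nat → Bool) (hj : j < m) :
    (((List.range m).map f).getD j false) = f j := by
  simp [List.getD_eq_getElem?_getD, List.getElem?_map, hj]

theorem pvAlt_eq (word : String) :
    is_three_pairs_alt word
      = (List.range (word.toList.length - 5)).any (pvTriple word.toList) := by
  unfold is_three_pairs_alt
  simp only [List.length_map, List.length_range]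
  have hrange : word.toList.length - 1 - 4 = word.toList.length - 5 := by omega
  rw [hrange]
  apply pvAny_range_ext
  intro i hi
  rw [pvGetD_map_range _ i _ (by omega), pvGetD_map_range _ (i + 2) _ (by omega),
      pvGetD_map_range _ (i + 4) _ (by omega)]
  simp [pvTriple]

-- ===== VERDICT (by name: the statement is the Claim_ definition above) =====
theorem is_three_pairs_spec : Claim_equal_is_three_pairs := by
  intro word _
  unfold Spec_is_three_pairs
  rw [pvAlt_eq]
  exact pvGo_eq word.toList
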